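/- GENERATED by mk_final_copies.py from the proof of the farm's unit `decode_residue.1d` (farm:decode_residue.1d.1: Lemmas.lean) as the
   re-elaboration sweep compiled it — do not edit. -/
import Asan.CheckWalk
import Vorbis.Spec.Units.decode_residue_1d

/-!
  Lemmas of the proof unit `decode_residue.1d` (0x10edca – 0x10ee00): from `cut1` (the return of `setup_temp_malloc`, assertion `At1d`
  of Vorbis/Spec/DecodeResidue1.lean) through `make_block_array` to the head of loop 2152 (`cut3`, assertion `At3`). COMMON is built
  for the first time (`Common.of_frame`): the slots are carried over the callee's footprint by `Mem.SameExcept.readLE`, `Bits`,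
  `ADOBusy` and μ by `ObjEq` of their windows (the two written spans — the stack below the protected frame and the row-pointer table
  in the temp block — do not meet `*f`), TB (`TempRows`) is the callee's postcondition.
-/

open X86 X86.User Asan Vorbis Vorbis.Spec Vorbis.Spec.DecodeResidue

set_option maxRecDepth 4000
set_option maxHeartbeats 4000000

namespace Vorbis.Spec.decode_residue_1d

/-- **The windows `ws` of `*f` read the same** when the memory changed only inside spans that do not meet `*f`. -/
theorem objEq_off {m m' : Mem} {f : Nat} {spans : List Span} (hs : Mem.SameExcept spans m m') (hf : f + 1808 ≤ 0xC00000)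
    (hd : ∀ s, s ∈ spans → s.hi ≤ f ∨ f + 1808 ≤ s.lo) (ws : Wins) (hb : WinsBelow ws 1808) : ObjEq ws m f m' f := by
  apply ObjEq.of_sameExcept hs
  · intro w hw
    have := hb w hw
    omega
  · intro w hw s hsp
    have h1 := hb w hw
    have h2 := hd s hsp
    omega

/-- **Segment .1d**: `make_block_array(part_classdata, C, 8·part_read)` (its precondition: the shadow layer at the call, `C ≤ 16`,
`8·part_read ≤ 65536`, the table inside the live temp block), the spill of `part_classdata`, `i = 0`, the spills of `r` and
`temp_alloc_point`, the reloads of `ch` and `do_not_decode`; the exit assertion `At3` with `Common.of_frame`. -/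
theorem rows_walk {Lay : Layout} (hLay : Lay.hi = 0x1000000) {μ : Microarch} (hμ : UserX.MicroOK μ) {u₀ : State}
    (hcode : HasCodeNat Lay u₀ Vorbis.L.decode_residue.entry Vorbis.Code.code_decode_residue.nat Vorbis.L.decode_residue.size)
    (g : G)
    (hmba : Calls Lay μ Vorbis.WayInv (Vorbis.conv u₀) Vorbis.L.make_block_array.entry (Vorbis.Spec.make_block_array.spec g.others' g.frames'))
    (hent : Entered u₀ g) (v : State) (hat : At1d u₀ g v) :
    ReachVia Lay μ WayInv v (fun v' => At3 u₀ g v') := by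
  obtain ⟨e, hge⟩ : ∃ e, g.e = e := ⟨_, rfl⟩
  have he := hent.entry
  have hpre := hent.pre
  have hRA : g.RA = (e.reg .rsp).toNat := by
    unfold G.RA
    rw [hge]
  obtain ⟨w_rip, v_rsp, v_rbp, v_rax, v_r12, v_r13, v_r14, v_r15, hcodeok, hinvabi, sav_rbp, sav_r15, sav_r14, sav_r13, sav_r12, sav_rbx, fr_f, fr_rb, fr_ch, fr_prd, fr_w, fr_rtype, fr_si, sl_n, sl_dnd, hsame, hshadow, hbits, hbusy, hmu⟩ := hat
  rw [hge] at he hpre v_rsp v_rbp sav_rbp sav_r15 sav_r14 sav_r13 sav_r12 sav_rbx fr_f fr_rb fr_ch fr_prd fr_w fr_rtype fr_si sl_n sl_dnd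
  rw [hRA] at hshadow fr_si
  v_entry he
  have w_eq : Mem.EqOn Vorbis.L.textLo Vorbis.L.textHi u₀.mem v.mem := hcodeok
  have hdf : v.flags .df = false := (show abiInv _ from hinvabi).1
  have hmx : v.mxcsr &&& 0x1F80 = 0x1F80 := (show abiInv _ from hinvabi).2
  have hsse := Vorbis.sseOK_of_abiInv hinvabi
  have hstack : Lay.Has (e.reg .rsp - 848) 856 := he_stack
  -- the numbers: `C ≤ 16`, `part_read ≤ 8192`, the temp block
  have hC16 : 1 ≤ g.C ∧ g.C ≤ 16 := by
    have h := hent.vorbis.header.HD1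
    unfold G.C
    rw [nchan_def]
    omega
  have hn4096 : g.n ≤ 4096 := by
    have h1 := hent.args.n_le
    have h2 := hent.vorbis.header.HD3.range
    have h4 := hent.vorbis.header.HD3.b1_eq
    omega
  have hPRD : g.PRD ≤ 8192 := by
    have h := Residue.partReadDec_le g.e.mem g.f g.rn g.n
    unfold G.PRD
    omega
  have htb : g.A'.TBlock g.TB.base g.TB.size := hbusy.tblock
  have htboff := hbusy.ok.tblock_off htb
  have htbrange := hbusy.ok.tblock_range htb
  have hsz : g.TB.size = g.C * (8 + 8 * g.PRD) := rfl
  have h8C : 8 * g.C ≤ g.TB.size := by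
    rw [hsz]
    have := Nat.mul_le_mul_left g.C (show 8 ≤ 8 + 8 * g.PRD by omega)
    omega
  have hAR2 := hbusy.ok.AR2
  have eB : g.A'.B = g.A.B := rfl
  have eS : g.A'.S = g.A.S := rfl
  have eL : g.A'.L = g.A.L := rfl
  rw [eB, eL] at htbrange
  rw [eS, eL] at hAR2
  have hr8 := le_r8 g.TB.size
  have hob : g.Blk (objBlock g.f) := hent.vorbis.obj
  have hobin := hpre.env.ok.inside _ hob
  have hobst := hpre.free.offStack _ hob
  have hobgap := hpre.free.offGap _ hob
  simp only [vblock, voff] at hobin hobst hobgap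
  have hlive : LiveIn g.others' g.frames' g.TB.base (8 * g.C) := by
    refine ⟨⟨g.TB.base, g.TB.size, .temp⟩, List.mem_append_right _ (hbusy.ok.AR6 _ htb.obj_mem), Nat.le_refl _, ?_⟩
    show g.TB.base + 8 * g.C ≤ g.TB.base + g.TB.size
    rw [hsz]
    have := Nat.mul_le_mul_left g.C (show 8 ≤ 8 + 8 * g.PRD by omega)
    omega
  u_walk hcode [hμ.vendor] until [Vorbis.L.decode_residue.cut3] span [Vorbis.L.textLo, Vorbis.L.textHi] side (v_side)
  case call_inv => v_inv
  case pre_10edd3 =>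
    have hun : ShadowUntouched v.mem s_10edd3.mem := by v_untouched
    have hrsp8 : (s_10edd3.reg .rsp).toNat + 8 = (e.reg .rsp).toNat - 248 := by
      rw [w_rsp]
      u_omega
    have hsh : ShadowPre g.others' g.frames' s_10edd3 := by
      refine ⟨?_, hent.offText'⟩
      rw [hrsp8]
      exact hshadow.untouched hun
    have hrsi : (s_10edd3.reg .rsi).toNat % 2 ^ 32 = g.C := by
      rw [w_rsi, toNat_ofBV32, toNat_part32, UInt64.toNat_ofNat']
      omega
    have hrdx : (s_10edd3.reg .rdx).toNat % 2 ^ 32 = 8 * g.PRD := by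
      rw [w_rdx, toNat_ofBV32, toNat_part32, UInt64.toNat_ofNat']
      omega
    have hrdi : (s_10edd3.reg .rdi).toNat = g.TB.base := by
      rw [w_rdi, UInt64.toNat_ofNat']
      omega
    refine ⟨hsh, ?_, ?_, Or.inr ?_⟩
    · rw [hrsi]
      omega
    · rw [hrdx]
      omega
    · rw [hrsi, hrdi]
      exact hlive
  case cont =>
    v_after_call w_rsp_10edd3 w_mem_10edd3
    have hrsi : (s_10edd3.reg .rsi).toNat % 2 ^ 32 = g.C := by
      rw [w_rsi_10edd3, toNat_ofBV32, toNat_part32, UInt64.toNat_ofNat']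
      omega
    have hrdx : (s_10edd3.reg .rdx).toNat % 2 ^ 32 = 8 * g.PRD := by
      rw [w_rdx_10edd3, toNat_ofBV32, toNat_part32, UInt64.toNat_ofNat']
      omega
    have hrdi : (s_10edd3.reg .rdi).toNat = g.TB.base := by
      rw [w_rdi_10edd3, UInt64.toNat_ofNat']
      omega
    rw [hrdi, hrsi] at w_same
    obtain ⟨hrax, hunp, hrows⟩ := w_post
    rw [hrsi, hrdx, hrdi, w_rdi_10edd3] at hrows
    have w_rax : s_10edd3r.reg .rax = UInt64.ofNat g.TB.base := hrax.trans w_rdi_10edd3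
    have hs0 : Mem.SameExcept [⟨(e.reg .rsp).toNat - 848, (e.reg .rsp).toNat - 248⟩,
        ⟨g.TB.base, g.TB.base + 8 * g.C⟩] v.mem s_10edd3r.mem := by
      u_same
    -- the two windows are below the shadow, off `*f`, and the second is off the stack
    have hwin : ∀ w : Span, w ∈ [(⟨(e.reg .rsp).toNat - 848, (e.reg .rsp).toNat - 248⟩ : Span), ⟨g.TB.base, g.TB.base + 8 * g.C⟩] →
        w.hi ≤ 0xC00000 ∧ (w.hi ≤ g.f ∨ g.f + 1808 ≤ w.lo) ∧
        (w.hi ≤ (e.reg .rsp).toNat - 248 ∨ (e.reg .rsp).toNat ≤ w.lo) := by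
      intro w hw
      simp only [List.mem_cons, List.mem_nil_iff, or_false] at hw
      rcases hw with rfl | rfl
      · simp only []
        omega
      · simp only []
        omega
    have hkeep : ∀ (a : Word) (n : Nat), (e.reg .rsp).toNat - 248 ≤ a.toNat → a.toNat + n ≤ (e.reg .rsp).toNat →
        s_10edd3r.mem.readLE a n = v.mem.readLE a n := by
      intro a n h1 h2
      apply hs0.readLE a n (by omega)
      intro w hw
      have := (hwin w hw).2.2
      omega
    have k_rbp : UInt64.ofNat (s_10edd3r.mem.readLE (e.reg .rsp - 8) 8) = e.reg .rbp := by
      rw [hkeep _ _ (by u_omega) (by u_omega)]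
      exact sav_rbp
    have k_r15 : UInt64.ofNat (s_10edd3r.mem.readLE (e.reg .rsp - 16) 8) = e.reg .r15 := by
      rw [hkeep _ _ (by u_omega) (by u_omega)]
      exact sav_r15
    have k_r14 : UInt64.ofNat (s_10edd3r.mem.readLE (e.reg .rsp - 24) 8) = e.reg .r14 := by
      rw [hkeep _ _ (by u_omega) (by u_omega)]
      exact sav_r14
    have k_r13 : UInt64.ofNat (s_10edd3r.mem.readLE (e.reg .rsp - 32) 8) = e.reg .r13 := by
      rw [hkeep _ _ (by u_omega) (by u_omega)]
      exact sav_r13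
    have k_r12 : UInt64.ofNat (s_10edd3r.mem.readLE (e.reg .rsp - 40) 8) = e.reg .r12 := by
      rw [hkeep _ _ (by u_omega) (by u_omega)]
      exact sav_r12
    have k_rbx : UInt64.ofNat (s_10edd3r.mem.readLE (e.reg .rsp - 48) 8) = e.reg .rbx := by
      rw [hkeep _ _ (by u_omega) (by u_omega)]
      exact sav_rbx
    have k_f : UInt64.ofNat (s_10edd3r.mem.readLE (e.reg .rsp - 184) 8) = e.reg .rdi := by
      rw [hkeep _ _ (by u_omega) (by u_omega)]
      exact fr_f
    have k_rb : UInt64.ofNat (s_10edd3r.mem.readLE (e.reg .rsp - 216) 8) = e.reg .rsi := by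
      rw [hkeep _ _ (by u_omega) (by u_omega)]
      exact fr_rb
    have k_ch : s_10edd3r.mem.readLE (e.reg .rsp - 156) 4 = g.ch := by
      rw [hkeep _ _ (by u_omega) (by u_omega)]
      exact fr_ch
    have k_prd : s_10edd3r.mem.readLE (e.reg .rsp - 196) 4 = g.PRD := by
      rw [hkeep _ _ (by u_omega) (by u_omega)]
      exact fr_prd
    have k_w : s_10edd3r.mem.readLE (e.reg .rsp - 200) 4 = g.W := by
      rw [hkeep _ _ (by u_omega) (by u_omega)]
      exact fr_w
    have k_rtype : s_10edd3r.mem.readLE (e.reg .rsp - 232) 4 = g.rtype := by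
      rw [hkeep _ _ (by u_omega) (by u_omega)]
      exact fr_rtype
    have k_si : s_10edd3r.mem.readLE (e.reg .rsp - 240) 8 = ((e.reg .rsp).toNat - 152) / 8 := by
      rw [hkeep _ _ (by u_omega) (by u_omega)]
      exact fr_si
    have k_n : s_10edd3r.mem.readLE (e.reg .rsp - 208) 4 = g.n := by
      rw [hkeep _ _ (by u_omega) (by u_omega)]
      exact sl_n
    have k_dnd : UInt64.ofNat (s_10edd3r.mem.readLE (e.reg .rsp - 168) 8) = e.reg .r9 := by
      rw [hkeep _ _ (by u_omega) (by u_omega)]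
      exact sl_dnd
    clear w_same
    u_walk hcode [hμ.vendor] until [Vorbis.L.decode_residue.cut3] span [Vorbis.L.textLo, Vorbis.L.textHi] side (v_side)
    refine ReachVia.done ?_
    -- the memory since `v`: the stack below the protected frame, and the row-pointer table
    have hsW : Mem.SameExcept [⟨(e.reg .rsp).toNat - 848, (e.reg .rsp).toNat - 152⟩] s_10edd3r.mem s_10ee00.mem := by
      rw [w_mem]
      u_same
    have hsF : Mem.SameExcept [⟨(e.reg .rsp).toNat - 848, (e.reg .rsp).toNat - 152⟩,
        ⟨g.TB.base, g.TB.base + 8 * g.C⟩] v.mem s_10ee00.mem := by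
      refine (hs0.mono ?_).trans (hsW.mono ?_)
      · intro w hw a h1 h2
        simp only [List.mem_cons, List.mem_nil_iff, or_false] at hw
        rcases hw with rfl | rfl
        · refine ⟨_, List.mem_cons_self, ?_, ?_⟩
          · exact h1
          · simp only [] at h2 ⊢
            omega
        · exact ⟨_, List.mem_cons_of_mem _ List.mem_cons_self, h1, h2⟩
      · intro w hw a h1 h2
        simp only [List.mem_cons, List.mem_nil_iff, or_false] at hw
        subst hw
        exact ⟨_, List.mem_cons_self, h1, h2⟩
    have hwinF : ∀ w : Span, w ∈ [(⟨(e.reg .rsp).toNat - 848, (e.reg .rsp).toNat - 152⟩ : Span), ⟨g.TB.base, g.TB.base + 8 * g.C⟩] →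
        w.hi ≤ 0xC00000 ∧ (w.hi ≤ g.f ∨ g.f + 1808 ≤ w.lo) := by
      intro w hw
      simp only [List.mem_cons, List.mem_nil_iff, or_false] at hw
      rcases hw with rfl | rfl
      · simp only []
        omega
      · simp only []
        omega
    have hunF : ShadowUntouched v.mem s_10ee00.mem := by
      unfold ShadowUntouched
      apply hsF.eqOn
      intro w hw
      right
      exact (hwinF w hw).1
    have hoff : ∀ s, s ∈ [(⟨(e.reg .rsp).toNat - 848, (e.reg .rsp).toNat - 152⟩ : Span), ⟨g.TB.base, g.TB.base + 8 * g.C⟩] →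
        s.hi ≤ g.f ∨ g.f + 1808 ≤ s.lo := fun s hs => (hwinF s hs).2
    have eRsp : (g.e.reg .rsp).toNat = (e.reg .rsp).toNat := by rw [hge]
    -- COMMON
    have hcommon : Common u₀ g s_10ee00 := by
      apply Common.of_frame hent
      case rbp =>
        rw [hge, w_kept .rbp rfl]
        exact v_rbp
      case rsp =>
        rw [hge]
        exact w_rsp
      case code => exact w_eq
      case inv => v_inv
      case s_rbp =>
        rw [hge]
        u_frame k_rbp
      case s_r15 =>
        rw [hge]
        u_frame k_r15
      case s_r14 =>
        rw [hge]
        u_frame k_r14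
      case s_r13 =>
        rw [hge]
        u_frame k_r13
      case s_r12 =>
        rw [hge]
        u_frame k_r12
      case s_rbx =>
        rw [hge]
        u_frame k_rbx
      case fr_f =>
        rw [hge]
        u_frame k_f
      case fr_rb =>
        rw [hge]
        u_frame k_rb
      case fr_ch =>
        rw [hge]
        u_frame k_ch
      case fr_prd =>
        rw [hge]
        u_frame k_prd
      case fr_w =>
        rw [hge]
        u_frame k_w
      case fr_rtype =>
        rw [hge]
        u_frame k_rtype
      case fr_pcd =>
        rw [hge]
        u_resolve
        rw [UInt64.toNat_ofNat']
        omega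
      case fr_si =>
        rw [hge, hRA]
        u_frame k_si
      case same =>
        refine hsame.step_same hsF ?_
        intro w hw a h1 h2
        simp only [List.mem_cons, List.mem_nil_iff, or_false] at hw
        rcases hw with rfl | rfl
        · refine ⟨⟨(g.e.reg .rsp).toNat - 848, (g.e.reg .rsp).toNat⟩, List.mem_cons_self, ?_, ?_⟩
          · simp only [] at h1 ⊢
            omega
          · simp only [] at h2 ⊢
            omega
        · refine ⟨⟨g.A.B + g.A.S, g.A.B + g.A.L⟩, ?_, ?_, ?_⟩
          · apply List.mem_cons_of_mem
            show _ ∈ DecodeResidue.writes g.A g.e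
            unfold DecodeResidue.writes
            apply List.mem_append_left
            simp only [List.mem_cons, true_or, or_true]
          · simp only [] at h1 ⊢
            omega
          · simp only [] at h2 ⊢
            omega
      case shadow =>
        rw [hRA]
        exact hshadow.untouched hunF
      case bits =>
        exact hbits.transfer (objEq_off hsF hobin.2 hoff Bits.wins (by decide)) ⟨hbits.OB1, hbits.OB1a⟩ hbits.OBR hbits.S2
      case busy =>
        exact hbusy.transfer (objEq_off hsF hobin.2 hoff ADO.wins (by decide))
      case tb =>
        refine ⟨hsz, ?_⟩
        intro j hj
        have h := hrows j hj
        rw [show UInt64.ofNat g.TB.base = addr g.TB.base from rfl, addr_add] at h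
        have e1 : (addr (g.TB.base + 8 * j)).toNat = g.TB.base + 8 * j := toNat_addr _ (by omega)
        have hj8 : 8 * j + 8 ≤ 8 * g.C := by omega
        unfold Mem.ptr Mem.u64 rowBase
        rw [hsW.readLE _ _ (by rw [e1]; omega) ?_]
        · exact h
        · intro w hw
          simp only [List.mem_cons, List.mem_nil_iff, or_false] at hw
          subst hw
          rw [e1]
          simp only []
          omega
      case mu_le =>
        rw [mu_transfer (objEq_off hsF hobin.2 hoff muWins (by decide))]
        exact hmu
    have hch32 : g.ch < 2 ^ 32 := by
      unfold G.ch
      omega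
    have htap32 : g.tap < 2 ^ 32 := by
      have h := hent.ado.ok.AR1
      unfold G.tap
      omega
    have hr64 : g.r < 2 ^ 64 := by
      have hR : ResidueOK g.Blk g.e.mem g.f := hent.vorbis.residue
      have hin := hpre.env.ok.inside _ hR.R2
      have hlt := hent.args.rn_lt
      have h1 := hR.R1
      simp only [voff] at hin
      unfold G.r stb_vorbis.residue_config_at
      simp only [voff]
      omega
    refine ⟨w_rip, hcommon, ⟨0, Nat.zero_le _, ?_⟩, ?_, ?_, ?_, ?_, ?_, ?_⟩
    · rw [w_rbx]
      rfl
    · rw [w_r14]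
      apply UInt64.toNat_inj.mp
      rw [toNat_ofBV32, BitVec.toNat_ofNat, UInt64.toNat_ofNat']
      omega
    · rw [hge]
      exact w_r15
    · rw [hge]
      u_resolve
      rw [UInt64.toNat_ofNat']
      omega
    · rw [hge]
      u_resolve
      rw [toNat_part32, UInt64.toNat_ofNat']
      omega
    · rw [hge]
      u_frame k_n
    · rw [hge]
      u_frame k_dnd

end Vorbis.Spec.decode_residue_1d
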